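-- pv_equiv track=rewrite | github.com/fahim-csedu/tts-model-eval | app.py | get_item_navigation
-- ===== SOURCE A (Python) =====
-- def get_item_navigation(items, item_id):
--     all_ids = [item['id'] for item in items]
--     try:
--         curr_idx = all_ids.index(item_id)
--         next_id = all_ids[curr_idx + 1] if curr_idx + 1 < len(all_ids) else None
--         prev_id = all_ids[curr_idx - 1] if curr_idx > 0 else None
--     except ValueError:
--         next_id = None
--         prev_id = None
--     return prev_id, next_id
-- ===== SOURCE B (Python) =====
-- def get_item_navigation(items, item_id):
--     # Single pass tracking the previously seen id; stops right after the match.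
--     prev_id = None
--     found = False
--     for item in items:
--         cur = item['id']
--         if found:
--             return prev_id, cur
--         if cur == item_id:
--             found = True
--         else:
--             prev_id = cur
--     if found:
--         return prev_id, None
--     return None, None
-- ===== Notes on version B (the rewrite author's own statement) =====
-- stated objective: alternative
-- what changed: Replaces build-all-ids + list.index + index arithmetic with a single early-exit pass that tracks the previous id in a local variable and stops one element after the first match.
import Mathlib
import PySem

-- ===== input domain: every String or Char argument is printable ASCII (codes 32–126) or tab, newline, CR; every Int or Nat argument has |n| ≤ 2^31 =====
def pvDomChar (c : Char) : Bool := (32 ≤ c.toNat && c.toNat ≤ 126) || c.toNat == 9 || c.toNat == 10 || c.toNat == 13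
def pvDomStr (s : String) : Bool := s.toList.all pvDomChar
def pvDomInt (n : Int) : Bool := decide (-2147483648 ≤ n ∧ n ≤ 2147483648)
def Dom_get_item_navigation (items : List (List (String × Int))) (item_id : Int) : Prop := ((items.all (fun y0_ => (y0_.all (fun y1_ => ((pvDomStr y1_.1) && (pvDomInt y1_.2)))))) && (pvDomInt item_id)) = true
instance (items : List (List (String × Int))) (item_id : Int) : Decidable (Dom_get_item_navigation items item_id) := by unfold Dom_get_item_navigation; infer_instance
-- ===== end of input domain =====

-- B replaces A's build-all-ids + .index + index arithmetic by a single early-exit pass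
-- tracking the previous id in a local variable (objective: alternative decomposition;
-- equal return value proved on Pre_).

-- ===== PORT A =====
-- item['id'] : first-match association-list lookup; none = KeyError
def pvGetId (item : List (String × Int)) : Option Int := List.lookup "id" item

-- all_ids = [item['id'] for item in items] (none if some item lacks the key, i.e. KeyError)
def pvAllIds : List (List (String × Int)) → Option (List Int)
  | [] => some []
  | it :: rest =>
    match pvGetId it, pvAllIds rest with
    | some v, some vs => some (v :: vs)
    | _, _ => none

def get_item_navigation (items : List (List (String × Int))) (item_id : Int) : Option Int × Option Int :=
  match pvAllIds items with
  | none => (none, none)  -- KeyError: excluded by Pre_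
  | some all_ids =>
    match PySem.List.index? all_ids item_id with
    | none => (none, none)  -- ValueError branch
    | some curr_idx =>
      -- next_id / prev_id locals inlined into the returned pair
      ((if curr_idx > 0 then all_ids[curr_idx - 1]? else none),
       (if curr_idx + 1 < all_ids.length then all_ids[curr_idx + 1]? else none))

-- ===== PORT B =====
-- the for-loop of Source B: state (prev_id, found), early return one step after the match
def pvAltLoop (rest : List (List (String × Int))) (item_id : Int) (prev_id : Option Int) (found : Bool) : Option Int × Option Int :=
  match rest with
  | [] => if found then (prev_id, none) else (none, none)
  | item :: rest' =>
    match pvGetId item with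
    | none => (none, none)  -- KeyError: excluded by Pre_
    | some cur =>
      if found then (prev_id, some cur)
      else if cur = item_id then pvAltLoop rest' item_id prev_id true
      else pvAltLoop rest' item_id (some cur) false

def get_item_navigation_alt (items : List (List (String × Int))) (item_id : Int) : Option Int × Option Int :=
  pvAltLoop items item_id none false

-- ===== PRECONDITION & SPEC =====
-- Pre_ excludes items missing the 'id' key, on which the Python A raises KeyError.
def Pre_get_item_navigation (items : List (List (String × Int))) (item_id : Int) : Prop :=
  ∀ item ∈ items, (List.lookup "id" item).isSome = true
instance (items : List (List (String × Int))) (item_id : Int) : Decidable (Pre_get_item_navigation items item_id) := by unfold Pre_get_item_navigation; infer_instance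

def pvWitness_get_item_navigation : (List (List (String × Int))) × Int := ([[("id", 1)], [("id", 2)], [("id", 3)]], 2)

def Spec_get_item_navigation (items : List (List (String × Int))) (item_id : Int) (out : Option Int × Option Int) : Prop := out = get_item_navigation_alt items item_id
instance (items : List (List (String × Int))) (item_id : Int) (out : Option Int × Option Int) : Decidable (Spec_get_item_navigation items item_id out) := by unfold Spec_get_item_navigation; infer_instance

-- ===== CLAIM (what is proved, stated in full; the proofs are below) =====
def Claim_equal_get_item_navigation : Prop := ∀ (items : List (List (String × Int))) (item_id : Int), Dom_get_item_navigation items item_id → Pre_get_item_navigation items item_id → Spec_get_item_navigation items item_id (get_item_navigation items item_id)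

-- ===== LEMMAS AND PROOFS =====

-- Under Pre_, every lookup succeeds, so pvAllIds is some
theorem pvAllIds_isSome (items : List (List (String × Int)))
    (h : ∀ item ∈ items, (List.lookup "id" item).isSome = true) :
    (pvAllIds items).isSome = true := by
  induction items with
  | nil => rfl
  | cons it rest ih =>
    have h1 := h it (by simp)
    have h2 : (pvAllIds rest).isSome = true := ih (fun i hi => h i (by simp [hi]))
    cases hl : List.lookup "id" it with
    | none => rw [hl] at h1; simp at h1
    | some v =>
      cases hr : pvAllIds rest with
      | none => rw [hr] at h2; simp at h2
      | some vs => simp [pvAllIds, pvGetId, hl, hr]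

theorem pv_or_some (p : Int) (l : List Int) :
    (l.getLast?).or (some p) = (p :: l).getLast? := by
  cases l with
  | nil => rfl
  | cons a l' =>
    rw [List.getLast?_cons_cons]
    cases h : (a :: l').getLast? with
    | none => simp [List.getLast?_cons] at h
    | some q => rfl

theorem pv_or_of_ne_nil (l : List Int) (q : Option Int) (h : l ≠ []) :
    (l.getLast?).or q = l.getLast? := by
  cases hl : l.getLast? with
  | none => simp [List.getLast?_eq_none_iff] at hl; exact absurd hl h
  | some x => rfl

-- after the match was found, the loop returns prev and the next id (head of remaining ids)
theorem pvAltLoop_found (rest : List (List (String × Int))) (item_id : Int)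
    (ids : List Int) (hids : pvAllIds rest = some ids) (prev : Option Int) :
    pvAltLoop rest item_id prev true = (prev, ids.head?) := by
  cases rest with
  | nil =>
    simp [pvAllIds] at hids
    subst hids
    simp [pvAltLoop]
  | cons it rest' =>
    cases hg : pvGetId it with
    | none => simp [pvAllIds, hg] at hids
    | some v =>
      cases hr : pvAllIds rest' with
      | none => simp [pvAllIds, hg, hr] at hids
      | some vs =>
        simp [pvAllIds, hg, hr] at hids
        subst hids
        simp [pvAltLoop, hg]

-- if item_id never occurs, the loop returns (none, none)
theorem pvAltLoop_not_mem (rest : List (List (String × Int))) (item_id : Int)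
    (ids : List Int) (hids : pvAllIds rest = some ids) (hnm : item_id ∉ ids)
    (prev : Option Int) :
    pvAltLoop rest item_id prev false = (none, none) := by
  induction rest generalizing ids prev with
  | nil => simp [pvAltLoop]
  | cons it rest' ih =>
    cases hg : pvGetId it with
    | none => simp [pvAltLoop, hg]
    | some v =>
      cases hr : pvAllIds rest' with
      | none => simp [pvAllIds, hg, hr] at hids
      | some vs =>
        simp [pvAllIds, hg, hr] at hids
        subst hids
        have hne : v ≠ item_id := by intro hv; exact hnm (by simp [hv])
        have hnm' : item_id ∉ vs := fun hv => hnm (by simp [hv])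
        simp [pvAltLoop, hg, hne, ih vs hr hnm']

-- first occurrence decomposition: scanning pre leaves prev = last of pre (or the initial prev)
theorem pvAltLoop_split (rest : List (List (String × Int))) (item_id : Int)
    (pre suf : List Int) (hids : pvAllIds rest = some (pre ++ item_id :: suf))
    (hnm : item_id ∉ pre) (prev : Option Int) :
    pvAltLoop rest item_id prev false = ((pre.getLast?).or prev, suf.head?) := by
  induction rest generalizing pre prev with
  | nil => simp [pvAllIds] at hids
  | cons it rest' ih =>
    cases hg : pvGetId it with
    | none => simp [pvAllIds, hg] at hids
    | some v =>
      cases hr : pvAllIds rest' with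
      | none => simp [pvAllIds, hg, hr] at hids
      | some vs =>
        simp [pvAllIds, hg, hr] at hids
        cases pre with
        | nil =>
          simp at hids
          have hv : v = item_id := hids.1
          have hvs : vs = suf := hids.2
          simp [pvAltLoop, hg, hv, pvAltLoop_found rest' item_id vs hr, hvs]
        | cons p pre' =>
          simp at hids
          have hv : v = p := hids.1
          have hvs : vs = pre' ++ item_id :: suf := hids.2
          have hne : v ≠ item_id := by
            intro h; exact hnm (by simp [← hv, h])
          have hnm' : item_id ∉ pre' := fun h => hnm (by simp [h])
          rw [hvs] at hr
          have hstep : pvAltLoop (it :: rest') item_id prev false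
              = pvAltLoop rest' item_id (some v) false := by
            simp [pvAltLoop, hg, hne]
          rw [hstep, ih pre' hr hnm' (some v), hv, pv_or_some,
              pv_or_of_ne_nil _ prev (by simp)]

theorem pv_main (items : List (List (String × Int))) (item_id : Int)
    (ids : List Int) (hids : pvAllIds items = some ids) :
    get_item_navigation items item_id = get_item_navigation_alt items item_id := by
  unfold get_item_navigation get_item_navigation_alt
  rw [hids]
  cases hidx : PySem.List.index? ids item_id with
  | none =>
    have hnm : item_id ∉ ids := (PySem.List.index?_eq_none_iff _ _).mp hidx
    rw [pvAltLoop_not_mem items item_id ids hids hnm none]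
    simp only [hidx]
  | some k =>
    obtain ⟨pre, suf, heq, hlen, hnm⟩ := (PySem.List.index?_eq_some_iff ids item_id k).mp hidx
    subst heq
    rw [pvAltLoop_split items item_id pre suf hids hnm none]
    have hnext : (if k + 1 < (pre ++ item_id :: suf).length then (pre ++ item_id :: suf)[k + 1]? else none) = suf.head? := by
      subst hlen
      by_cases hlt : pre.length + 1 < (pre ++ item_id :: suf).length
      · simp only [if_pos hlt]
        rw [List.getElem?_append_right (by omega)]
        rw [show pre.length + 1 - pre.length = 1 from by omega]
        simp [List.head?_eq_getElem?]
      · simp only [if_neg hlt]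
        have hL : (pre ++ item_id :: suf).length = pre.length + suf.length + 1 := by
          simp; omega
        rw [hL] at hlt
        have hs : suf = [] := List.eq_nil_of_length_eq_zero (by omega)
        simp [hs]
    have hprev : (if k > 0 then (pre ++ item_id :: suf)[k - 1]? else none) = (pre.getLast?).or none := by
      subst hlen
      cases pre with
      | nil => simp
      | cons p pre' =>
        simp only [if_pos (by simp : (p :: pre').length > 0)]
        rw [List.getElem?_append_left (Nat.sub_lt (by simp) (by norm_num))]
        rw [List.getLast?_eq_getElem?]
        simp
    simp only [hidx, hnext, hprev]

-- ===== VERDICT (by name: the statement is the Claim_ definition above) =====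
theorem get_item_navigation_spec : Claim_equal_get_item_navigation := by
  intro items item_id _ hpre
  unfold Spec_get_item_navigation
  have h := pvAllIds_isSome items hpre
  cases hids : pvAllIds items with
  | none => rw [hids] at h; simp at h
  | some ids => exact pv_main items item_id ids hids
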